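-- pv_equiv track=rewrite | github.com/nail1021734/Taiwan_news_dataset | news/preprocess/preprocess.py | find_pair
-- ===== SOURCE A (Python) =====
-- def find_pair(
--     article: str,
--     left_char: str,
--     right_char: str,
--     replace_str: str = '',
--     include: bool = True,
-- ) -> str:
--     r"""將 `article` 內 `left_char` 和 `right_char` 之間的字串替換為 `replace_str`.
--
--     Parameters
--     ==========
--     `article`: str
--         要處理的文章.
--     `left_char`: str
--         `left_char` 與 `right_char` 內的字串會被替換為 `replace_str`.
--     `right_char`: str
--         `left_char` 與 `right_char` 內的字串會被替換為 `replace_str`.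
--     `replace_str`: str
--         選擇要替換的字串.
--     `include`: bool
--         若為 True 則會將 `left_char` 與 `right_char` 一起替換掉, 為 False 則會將
--         `left_char` 與 `right_char` 保留下來.
--     """
--     # A stack to count `left_char` hit amount.
--     count_stack = []
--
--     # `rp_article` 為最後回傳的文章.
--     rp_article = ''
--     last_index = 0
--     for i, char in enumerate(article):
--         if char == left_char:
--             if len(count_stack) == 0:
--                 # 若 `len(count_stack) == 0` 表示遇到開頭的 `left_char`.
--                 # 若不等於 0 表示先前已經遇過還沒匹配到 `right_char` 的 `left_char`.
--                 if include:
--                     # 將 `left_char` 之前的文章片段加到 `rp_article` 之中.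
--                     rp_article += article[last_index:i]
--                 else:
--                     # 將 `left_char` 之前的文章片段加到 `rp_article` 之中.
--                     # 保留 `left_char`.
--                     rp_article += article[last_index:i + 1]
--             count_stack.append(i)
--
--         if char == right_char:
--             if len(count_stack) > 0:
--                 # 若 `len(count_stack) > 0` 則 pop 一個元素.
--                 count_stack.pop()
--             else:
--                 # 若 `len(count_stack) == 0` 則直接跳過後續處理(表示沒有匹配的
--                 # `left_char` 丟棄此 `right_char`).
--                 continue
--             if len(count_stack) == 0:
--                 # 若 pop 一個元素後 `len(count_stack) == 0` 表示此 `right_char`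
--                 # 有匹配的 `left_char` 並且是最外層的 `left_char`.
--                 if include:
--                     # 使用 `replace_str` 代替先前的文章片段.
--                     rp_article += replace_str
--                 else:
--                     # 使用 `replace_str` 代替先前的文章片段.
--                     # 保留 `right_char`.
--                     rp_article += replace_str + char
--                 # 更新 `last_index` 到 `right_char` 的下一個索引.
--                 last_index = i + 1
--     # 將 `last_index` 之後的文章, 加到 `rp_article` 之後.
--     rp_article += article[last_index:]
--     return rp_article
-- ===== SOURCE B (Python) =====
-- def find_pair(
--     article: str,
--     left_char: str,
--     right_char: str,
--     replace_str: str = '',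
--     include: bool = True,
-- ) -> str:
--     # Pass 1: reduce the article to a stream of boundary events: the positions
--     # where an outermost delimiter group opens and where it closes, found with a
--     # simple depth counter (no per-character output handling here).
--     events = []
--     depth = 0
--     for i, ch in enumerate(article):
--         if ch == left_char:
--             if depth == 0:
--                 events.append(('open', i))
--             depth += 1
--         if ch == right_char and depth > 0:
--             depth -= 1
--             if depth == 0:
--                 events.append(('close', i))
--
--     # Pass 2: render the stream: opening a group flushes the plain text before
--     # it; closing a group emits the replacement and moves the cursor past it.
--     parts = []
--     last = 0
--     for kind, i in events:
--         if kind == 'open':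
--             parts.append(article[last:i] if include else article[last:i + 1])
--         else:
--             parts.append(replace_str if include else replace_str + right_char)
--             last = i + 1
--     parts.append(article[last:])
--     return ''.join(parts)
-- ===== Notes on version B (the rewrite author's own statement) =====
-- stated objective: alternative
-- what changed: B replaces A's single scan that builds the output string inline while tracking a stack and last_index with two separate passes: a depth-counter scan that only collects the boundary events (open/close positions) of the outermost delimiter groups, and a rendering pass that assembles the output from that event stream.
import Mathlib
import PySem

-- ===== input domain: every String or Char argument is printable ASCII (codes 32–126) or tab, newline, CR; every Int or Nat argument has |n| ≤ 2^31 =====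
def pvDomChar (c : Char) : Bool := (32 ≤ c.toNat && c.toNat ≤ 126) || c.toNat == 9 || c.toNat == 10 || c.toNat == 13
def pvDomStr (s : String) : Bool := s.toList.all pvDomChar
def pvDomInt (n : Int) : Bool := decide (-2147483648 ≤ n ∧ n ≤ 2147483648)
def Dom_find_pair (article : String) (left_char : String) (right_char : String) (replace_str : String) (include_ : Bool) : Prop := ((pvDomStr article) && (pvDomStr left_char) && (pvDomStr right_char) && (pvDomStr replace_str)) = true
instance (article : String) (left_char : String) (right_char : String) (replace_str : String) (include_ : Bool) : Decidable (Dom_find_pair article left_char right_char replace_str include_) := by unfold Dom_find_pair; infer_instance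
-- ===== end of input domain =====

-- B re-implements A in two passes (collect the boundary events of the outermost delimiter
-- groups with a depth counter, then render the event stream) instead of A's single
-- string-building scan with a stack; same return value on every input.

-- ===== PORT A =====
-- one step of A's `for i, char in enumerate(article)` loop; state = (count_stack, rp_article, last_index).
-- Python's list.append/list.pop() both act at the same end of count_stack and its elements are
-- never read (only len is used), so push/pop are modelled at the head.
def fpStepA (cs L R repl : List Char) (inc : Bool)
    (s : List Int × List Char × Int) (p : Int × Char) : List Int × List Char × Int :=
  let stack := s.1; let rp := s.2.1; let last := s.2.2
  let i := p.1; let c := p.2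
  let s1 : List Int × List Char × Int :=
    if [c] = L then
      (i :: stack,
       (if stack.length = 0 then
          (if inc then rp ++ PySem.List.slice cs (some last) (some i)
           else rp ++ PySem.List.slice cs (some last) (some (i + 1)))
        else rp),
       last)
    else (stack, rp, last)
  if [c] = R then
    match s1.1 with
    | [] => s1              -- `continue`
    | _ :: rest =>
      if rest.length = 0 then
        (rest, (if inc then s1.2.1 ++ repl else s1.2.1 ++ repl ++ [c]), i + 1)
      else (rest, s1.2.1, s1.2.2)
  else s1

def find_pair (article : String) (left_char : String) (right_char : String) (replace_str : String) (include_ : Bool) : String :=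
  let cs := article.toList
  let fin := (PySem.List.enumerate cs).foldl
    (fpStepA cs left_char.toList right_char.toList replace_str.toList include_) ([], [], 0)
  String.mk (fin.2.1 ++ PySem.List.slice cs (some fin.2.2) none)

-- ===== PORT B =====
-- pass 1 step: depth counter + event list; an event is (true, i) when an outermost group
-- opens at i and (false, i) when one closes at i.
def fpStepE (L R : List Char) (s : Int × List (Bool × Int)) (p : Int × Char) : Int × List (Bool × Int) :=
  let d := s.1; let ev := s.2
  let i := p.1; let c := p.2
  let ev1 := if [c] = L ∧ d = 0 then ev ++ [(true, i)] else ev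
  let d1 := if [c] = L then d + 1 else d
  if [c] = R ∧ 0 < d1 then
    if d1 - 1 = 0 then (d1 - 1, ev1 ++ [(false, i)]) else (d1 - 1, ev1)
  else (d1, ev1)

-- pass 2 step: render one event; state = (parts, last).
def fpRenderStep (cs repl R : List Char) (inc : Bool)
    (s : List (List Char) × Int) (e : Bool × Int) : List (List Char) × Int :=
  if e.1 then
    (s.1 ++ [if inc then PySem.List.slice cs (some s.2) (some e.2)
             else PySem.List.slice cs (some s.2) (some (e.2 + 1))], s.2)
  else
    (s.1 ++ [if inc then repl else repl ++ R], e.2 + 1)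

def find_pair_alt (article : String) (left_char : String) (right_char : String) (replace_str : String) (include_ : Bool) : String :=
  let cs := article.toList
  let events := ((PySem.List.enumerate cs).foldl
    (fpStepE left_char.toList right_char.toList) (0, [])).2
  let rend := events.foldl (fpRenderStep cs replace_str.toList right_char.toList include_) ([], 0)
  String.mk ((rend.1 ++ [PySem.List.slice cs (some rend.2) none]).flatten)

-- ===== PRECONDITION & SPEC =====
def Spec_find_pair (article : String) (left_char : String) (right_char : String) (replace_str : String) (include_ : Bool) (out : String) : Prop := out = find_pair_alt article left_char right_char replace_str include_
instance (article : String) (left_char : String) (right_char : String) (replace_str : String) (include_ : Bool) (out : String) : Decidable (Spec_find_pair article left_char right_char replace_str include_ out) := by unfold Spec_find_pair; infer_instance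

-- ===== CLAIM (what is proved, stated in full; the proofs are below) =====
def Claim_equal_find_pair : Prop := ∀ (article : String) (left_char : String) (right_char : String) (replace_str : String) (include_ : Bool), Dom_find_pair article left_char right_char replace_str include_ → Spec_find_pair article left_char right_char replace_str include_ (find_pair article left_char right_char replace_str include_)

-- ===== LEMMAS AND PROOFS =====

-- invariant linking A's scan state to B's collector state: rendering the events collected
-- so far yields exactly A's partial output and last_index, and the depth is the stack size.
def fpInv (cs repl R : List Char) (inc : Bool)
    (a : List Int × List Char × Int) (c : Int × List (Bool × Int)) : Prop :=
  let r := c.2.foldl (fpRenderStep cs repl R inc) ([], 0)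
  (a.1.length : Int) = c.1 ∧ a.2.2 = r.2 ∧ a.2.1 = r.1.flatten

lemma fpInv_step (cs L R repl : List Char) (inc : Bool) (p : Int × Char)
    (a : List Int × List Char × Int) (c : Int × List (Bool × Int))
    (h : fpInv cs repl R inc a c) :
    fpInv cs repl R inc (fpStepA cs L R repl inc a p) (fpStepE L R c p) := by
  obtain ⟨stack, rp, last⟩ := a
  obtain ⟨d, ev⟩ := c
  obtain ⟨i, ch⟩ := p
  simp only [fpInv, fpStepA, fpStepE] at h ⊢
  obtain ⟨h1, h2, h3⟩ := h
  have hd0 : 0 ≤ d := h1 ▸ Int.natCast_nonneg _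
  by_cases hl : [ch] = L <;> by_cases hr : [ch] = R
  · -- left and right delimiter are the same single char
    have hLR : L = R := hl.symm.trans hr
    cases stack with
    | nil =>
      have hd : d = 0 := by simpa using h1.symm
      subst hd
      simp [hl, hLR, List.foldl_append, fpRenderStep, h2, h3]
      split_ifs <;> simp
    | cons x rest =>
      have hd : 0 < d := by rw [← h1]; exact_mod_cast Nat.succ_pos _
      simp [hl, hLR, h2, h3, hd, hd0, ne_of_gt hd]
      simpa using h1
  · -- opening delimiter only
    cases stack with
    | nil =>
      have hd : d = 0 := by simpa using h1.symm
      subst hd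
      have hLR : ¬ L = R := fun hh => hr (hl.trans hh)
      simp [hl, hLR, List.foldl_append, fpRenderStep, h2, h3]
      split_ifs <;> simp
    | cons x rest =>
      have hd : 0 < d := by rw [← h1]; exact_mod_cast Nat.succ_pos _
      have hLR : ¬ L = R := fun hh => hr (hl.trans hh)
      simp [hl, hLR, h2, h3, hd, hd0, ne_of_gt hd]
      simpa using h1
  · -- closing delimiter only
    have hRL : ¬ R = L := fun hh => hl (hr.trans hh)
    cases stack with
    | nil =>
      have hd : d = 0 := by simpa using h1.symm
      subst hd
      simp [hr, hRL, h2, h3]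
    | cons x rest =>
      have hd : 0 < d := by rw [← h1]; exact_mod_cast Nat.succ_pos _
      by_cases hrest : rest.length = 0
      · have hd1 : d = 1 := by rw [← h1]; simp [hrest]
        subst hd1
        simp [hr, hRL, hrest, List.foldl_append, fpRenderStep, h2, h3]
        split_ifs <;> simp
      · have hlen : (rest.length : Int) + 1 = d := by
          simpa using h1
        have hd1 : d - 1 ≠ 0 := by omega
        simp [hr, hRL, hrest, h2, h3, hd, hd1, ne_of_gt hd]
        omega
  · -- neither
    simp [hl, hr, h2, h3]
    exact h1

lemma fpInv_foldl (cs L R repl : List Char) (inc : Bool) (l : List (Int × Char))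
    (a : List Int × List Char × Int) (c : Int × List (Bool × Int))
    (h : fpInv cs repl R inc a c) :
    fpInv cs repl R inc (l.foldl (fpStepA cs L R repl inc) a) (l.foldl (fpStepE L R) c) := by
  induction l generalizing a c with
  | nil => exact h
  | cons x xs ih => exact ih _ _ (fpInv_step cs L R repl inc x a c h)

-- ===== VERDICT (by name: the statement is the Claim_ definition above) =====
theorem find_pair_spec : Claim_equal_find_pair := by
  intro article left_char right_char replace_str include_ _
  unfold Spec_find_pair find_pair find_pair_alt
  have h := fpInv_foldl article.toList left_char.toList right_char.toList replace_str.toList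
    include_ (PySem.List.enumerate article.toList) ([], [], 0) (0, [])
    (by simp [fpInv])
  obtain ⟨h1, h2, h3⟩ := h
  dsimp only at h1 h2 h3 ⊢
  simp [h2, h3, List.flatten_append]
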